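-- pv_equiv track=rewrite | github.com/it-code-lab/stories_nw | multi_profile_media_agent.py | partition_rows_by_account
-- ===== SOURCE A (Python) =====
-- from typing import Dict, List, Optional, Tuple
-- from typing import Dict, List, Tuple
--
-- def partition_rows_by_account(
--     rows: List[dict],
--     accounts: List[dict],
--     max_per_account: int | None = None
-- ) -> List[Tuple[dict, List[dict]]]:
--     """
--     Partitions Excel job rows across accounts.
--
--     Rules:
--     1) If row.account_id matches an account, it is pinned there
--     2) Remaining rows are distributed round-robin
--     3) Optional max_per_account cap is enforced
--     4) Empty buckets are omitted
--
--     Returns: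
--         List of (account, [rows]) tuples
--     """
--
--     # Initialize buckets
--     rows_per_account: Dict[str, List[dict]] = {
--         acc["id"]: [] for acc in accounts
--     }
--
--     free_rows = []
--
--     # Pass 1: pinned rows
--     for row in rows:
--         acct = (row.get("account_id") or "").strip()
--         if acct and acct in rows_per_account:
--             rows_per_account[acct].append(row)
--         else:
--             free_rows.append(row)
--
--     # Pass 2: round-robin free rows
--     acc_ids = [acc["id"] for acc in accounts]
--     idx = 0
--
--     for row in free_rows:
--         target_id = acc_ids[idx % len(acc_ids)]
--         rows_per_account[target_id].append(row)
--         idx += 1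
--
--     # Pass 3: apply max cap and emit result
--     result: List[Tuple[dict, List[dict]]] = []
--
--     for acc in accounts:
--         bucket = rows_per_account[acc["id"]]
--
--         if max_per_account is not None:
--             bucket = bucket[:max_per_account]
--
--         if bucket:
--             result.append((acc, bucket))
--
--     return result
-- ===== SOURCE B (Python) =====
-- def partition_rows_by_account(rows, accounts, max_per_account=None):
--     # Declarative formulation: no mutable per-account buckets at all; each
--     # account's bucket is computed independently as (rows pinned to it) +
--     # (free rows whose round-robin slot index maps to it).
--     ids = [acc["id"] for acc in accounts]
--     idset = set(ids)
--     free = [r for r in rows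
--             if not ((a := (r.get("account_id") or "").strip()) and a in idset)]
--     result = []
--     for acc in accounts:
--         aid = acc["id"]
--         bucket = ([r for r in rows
--                    if (a := (r.get("account_id") or "").strip()) and a == aid]
--                   + [r for j, r in enumerate(free) if ids[j % len(ids)] == aid])
--         if max_per_account is not None:
--             bucket = bucket[:max_per_account]
--         if bucket:
--             result.append((acc, bucket))
--     return result
-- ===== Notes on version B (the rewrite author's own statement) =====
-- stated objective: alternative
-- what changed: A's imperative dict-of-buckets accumulation (pin pass mutating buckets + round-robin pass over a collected free_rows list + emit pass) is replaced by a declarative formulation with no mutable buckets at all: each account's bucket is computed independently as a pinned filter over rows plus a round-robin slot filter over the enumerated free rows.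
import Mathlib
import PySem

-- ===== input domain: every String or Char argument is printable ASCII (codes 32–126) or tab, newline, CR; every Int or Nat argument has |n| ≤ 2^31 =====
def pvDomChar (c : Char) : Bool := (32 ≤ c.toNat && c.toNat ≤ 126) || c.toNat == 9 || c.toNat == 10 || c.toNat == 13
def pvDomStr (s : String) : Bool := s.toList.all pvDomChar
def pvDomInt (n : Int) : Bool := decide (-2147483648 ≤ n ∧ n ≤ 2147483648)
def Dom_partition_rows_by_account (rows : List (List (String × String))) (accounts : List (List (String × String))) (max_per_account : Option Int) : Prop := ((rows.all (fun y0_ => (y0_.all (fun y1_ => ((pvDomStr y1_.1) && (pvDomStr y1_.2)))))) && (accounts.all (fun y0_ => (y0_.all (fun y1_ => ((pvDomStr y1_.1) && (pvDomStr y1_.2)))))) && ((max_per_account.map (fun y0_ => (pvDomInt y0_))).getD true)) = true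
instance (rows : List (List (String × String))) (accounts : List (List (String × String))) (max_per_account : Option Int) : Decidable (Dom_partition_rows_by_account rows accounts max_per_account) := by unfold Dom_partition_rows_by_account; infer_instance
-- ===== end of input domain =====

-- B replaces A's mutable dict buckets (pin pass + round-robin pass over a free_rows list + emit
-- pass) by a declarative per-account formulation: each bucket is a pinned filter over rows plus a
-- round-robin slot filter over the enumerated free rows; same return value (alternative algorithm).

abbrev PRow := List (String × String)
abbrev PBuckets := PySem.Dict String (List PRow)

-- acc["id"] : Python raises KeyError when "id" is missing; Pre_ requires the key, so the default is never read
def pvAccId (acc : PRow) : String := (PySem.Dict.mk acc).getD "id" ""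
-- (row.get("account_id") or "").strip()
def pvRowAcct (row : PRow) : String := PySem.Str.strip ((PySem.Dict.mk row).getD "account_id" "")

-- ===== PORT A =====
def partition_rows_by_account (rows : List (List (String × String))) (accounts : List (List (String × String))) (max_per_account : Option Int) : List ((List (String × String)) × (List (List (String × String)))) :=
  -- rows_per_account = {acc["id"]: [] for acc in accounts}
  let rows_per_account : PBuckets :=
    accounts.foldl (fun d acc => d.insert (pvAccId acc) []) PySem.Dict.empty
  -- Pass 1: pinned rows (state: (rows_per_account, free_rows))
  let st :=
    rows.foldl (fun (st : PBuckets × List PRow) row =>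
      let acct := pvRowAcct row
      if acct != "" && st.1.contains acct then
        (st.1.modify acct [] (· ++ [row]), st.2)
      else
        (st.1, st.2 ++ [row])) (rows_per_account, ([] : List PRow))
  -- Pass 2: round-robin free rows (acc_ids[idx % len] raises ZeroDivisionError when accounts = [];
  -- Pre_ excludes that, so the "" default of getD is never read)
  let acc_ids := accounts.map pvAccId
  let rows_per_account :=
    (st.2.foldl (fun (st2 : PBuckets × Nat) row =>
      (st2.1.modify (acc_ids.getD (st2.2 % acc_ids.length) "") [] (· ++ [row]), st2.2 + 1))
      (st.1, 0)).1
  -- Pass 3: apply max cap and emit result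
  accounts.foldl (fun res acc =>
    let bucket := rows_per_account.getD (pvAccId acc) []
    let bucket := match max_per_account with
      | some m => PySem.List.slice bucket none (some m)
      | none => bucket
    if bucket != [] then res ++ [(acc, bucket)] else res) []

-- ===== PORT B =====
def partition_rows_by_account_alt (rows : List (List (String × String))) (accounts : List (List (String × String))) (max_per_account : Option Int) : List ((List (String × String)) × (List (List (String × String)))) :=
  let ids := accounts.map pvAccId
  let idset : PySem.Set String := PySem.Set.ofList ids
  -- free = [r for r in rows if not ((a := acct(r)) and a in idset)]
  let free := rows.filter (fun r => !(pvRowAcct r != "" && PySem.Set.contains idset (pvRowAcct r)))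
  accounts.foldl (fun res acc =>
    let aid := pvAccId acc
    -- pinned filter + round-robin slot filter over enumerate(free)
    let bucket :=
      rows.filter (fun r => pvRowAcct r != "" && pvRowAcct r == aid)
      ++ ((PySem.List.enumerate free 0).filter
            (fun p => PySem.List.pyGetD ids (PySem.Int.mod p.1 (ids.length : Int)) "" == aid)).map (·.2)
    let bucket := match max_per_account with
      | some m => PySem.List.slice bucket none (some m)
      | none => bucket
    if bucket != [] then res ++ [(acc, bucket)] else res) []

-- ===== PRECONDITION & SPEC =====
-- Pre_ excludes exactly the inputs on which the Python A raises: an account dict without the "id"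
-- key (KeyError in the bucket comprehension) and accounts = [] with rows ≠ [] (ZeroDivisionError).
def Pre_partition_rows_by_account (rows : List (List (String × String))) (accounts : List (List (String × String))) (max_per_account : Option Int) : Prop :=
  (∀ acc ∈ accounts, (PySem.Dict.mk acc).contains "id" = true) ∧ (accounts = [] → rows = [])
instance (rows : List (List (String × String))) (accounts : List (List (String × String))) (max_per_account : Option Int) : Decidable (Pre_partition_rows_by_account rows accounts max_per_account) := by unfold Pre_partition_rows_by_account; infer_instance

def pvWitness_partition_rows_by_account : (List (List (String × String))) × (List (List (String × String))) × Option Int :=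
  ([[("account_id", "a1"), ("v", "0")], [("v", "1")]], [[("id", "a1")], [("id", "a2")]], some 1)

def Spec_partition_rows_by_account (rows : List (List (String × String))) (accounts : List (List (String × String))) (max_per_account : Option Int) (out : List ((List (String × String)) × (List (List (String × String))))) : Prop := out = partition_rows_by_account_alt rows accounts max_per_account
instance (rows : List (List (String × String))) (accounts : List (List (String × String))) (max_per_account : Option Int) (out : List ((List (String × String)) × (List (List (String × String))))) : Decidable (Spec_partition_rows_by_account rows accounts max_per_account out) := by unfold Spec_partition_rows_by_account; infer_instance

-- ===== CLAIM (what is proved, stated in full; the proofs are below) =====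
def Claim_equal_partition_rows_by_account : Prop := ∀ (rows : List (List (String × String))) (accounts : List (List (String × String))) (max_per_account : Option Int), Dom_partition_rows_by_account rows accounts max_per_account → Pre_partition_rows_by_account rows accounts max_per_account → Spec_partition_rows_by_account rows accounts max_per_account (partition_rows_by_account rows accounts max_per_account)
-- ===== LEMMAS AND PROOFS =====

-- the pinned-append step of A's pass 1, with the membership test abstracted to a fixed
-- predicate c (the key set never changes during the loop)
def pvPinStep (c : String → Bool) (d : PBuckets) (row : PRow) : PBuckets :=
  if pvRowAcct row != "" && c (pvRowAcct row) then d.modify (pvRowAcct row) [] (· ++ [row]) else d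

def pvFree (c : String → Bool) (row : PRow) : Bool := !(pvRowAcct row != "" && c (pvRowAcct row))

-- the rows A's round-robin distribution (starting at counter i) puts into bucket s
def pvAssign (ids : List String) : List PRow → Nat → String → List PRow
  | [], _, _ => []
  | r :: t, i, s => (if ids.getD (i % ids.length) "" = s then [r] else []) ++ pvAssign ids t (i + 1) s

theorem pvPinStep_contains (c : String → Bool) (d : PBuckets) (row : PRow)
    (hc : ∀ s, d.contains s = c s) : ∀ s, (pvPinStep c d row).contains s = c s := by
  intro s
  unfold pvPinStep
  by_cases h : (pvRowAcct row != "" && c (pvRowAcct row)) = true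
  · simp only [h, if_true, PySem.Dict.contains_modify, hc]
    by_cases hs : s == pvRowAcct row
    · simp only [hs, Bool.true_or]
      have : c (pvRowAcct row) = true := by
        cases hb : c (pvRowAcct row) <;> simp [hb] at h ⊢
      rw [eq_of_beq hs, this]
    · simp [hs]
  · simp [h, hc]

-- Pass 1 of A, characterised: the dict side is the pvPinStep fold, the free side is a filter
theorem pvPass1_eq (c : String → Bool) :
    ∀ (rows : List PRow) (d : PBuckets) (f : List PRow), (∀ s, d.contains s = c s) →
    rows.foldl (fun (st : PBuckets × List PRow) row =>
        if pvRowAcct row != "" && st.1.contains (pvRowAcct row) then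
          (st.1.modify (pvRowAcct row) [] (· ++ [row]), st.2)
        else (st.1, st.2 ++ [row])) (d, f)
      = (rows.foldl (pvPinStep c) d, f ++ rows.filter (pvFree c)) := by
  intro rows
  induction rows with
  | nil => intro d f hc; simp
  | cons r t ih =>
    intro d f hc
    simp only [List.foldl_cons, List.filter_cons, hc (pvRowAcct r)]
    by_cases h : (pvRowAcct r != "" && c (pvRowAcct r)) = true
    · have hfree : pvFree c r = false := by simp [pvFree, h]
      have hps : pvPinStep c d r = d.modify (pvRowAcct r) [] (· ++ [r]) := by
        simp [pvPinStep, h]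
      rw [if_pos h, ← hps, ih _ f (pvPinStep_contains c d r hc)]
      simp [hfree]
    · have h' : (pvRowAcct r != "" && c (pvRowAcct r)) = false := by
        cases hb : (pvRowAcct r != "" && c (pvRowAcct r)) <;> simp_all
      have hfree : pvFree c r = true := by simp [pvFree, h']
      rw [if_neg h, ih d (f ++ [r]) hc]
      simp [pvPinStep, h', hfree]

-- Pass 2 of A, characterised per bucket
theorem pvPass2_getD (ids : List String) :
    ∀ (free : List PRow) (d : PBuckets) (i : Nat) (s : String),
    ((free.foldl (fun (st2 : PBuckets × Nat) row =>
        (st2.1.modify (ids.getD (st2.2 % ids.length) "") [] (· ++ [row]), st2.2 + 1)) (d, i)).1).getD s []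
      = d.getD s [] ++ pvAssign ids free i s := by
  intro free
  induction free with
  | nil => intro d i s; simp [pvAssign]
  | cons r t ih =>
    intro d i s
    simp only [List.foldl_cons, pvAssign, ih]
    rw [PySem.Dict.getD_modify]
    by_cases hs : s = ids.getD (i % ids.length) ""
    · simp [hs, List.append_assoc]
    · rw [if_neg hs, if_neg (fun h => hs h.symm)]
      simp

-- A's pvAssign IS B's enumerate-filter-map round-robin comprehension
theorem pvAssign_eq_enum (ids : List String) :
    ∀ (l : List PRow) (i : Nat) (s : String),
    pvAssign ids l i s
      = ((PySem.List.enumerate l (i : Int)).filter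
          (fun p => PySem.List.pyGetD ids (PySem.Int.mod p.1 (ids.length : Int)) "" == s)).map (·.2) := by
  intro l
  induction l with
  | nil => intro i s; simp [pvAssign, PySem.List.enumerate_nil]
  | cons r t ih =>
    intro i s
    have hcast : ((i : Int) + 1) = ((i + 1 : Nat) : Int) := by push_cast; ring
    have hidx : PySem.List.pyGetD ids (PySem.Int.mod (i : Int) ((ids.length : Nat) : Int)) ""
        = ids.getD (i % ids.length) "" := by
      rw [PySem.Int.mod_natCast, PySem.List.pyGetD_natCast]
    rw [PySem.List.enumerate_cons, List.filter_cons, hcast]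
    simp only [pvAssign, ih, hidx, List.getD_eq_getElem?_getD]
    by_cases hs : ids[i % ids.length]?.getD "" = s
    · simp [hs]
    · simp [hs]

-- the pinned bucket of key s after A's pass 1: a plain filter over rows (c s = true)
theorem pvPin_getD (c : String → Bool) :
    ∀ (rows : List PRow) (d : PBuckets) (s : String), c s = true →
    (rows.foldl (pvPinStep c) d).getD s []
      = d.getD s [] ++ rows.filter (fun r => pvRowAcct r != "" && pvRowAcct r == s) := by
  intro rows
  induction rows with
  | nil => intro d s _; simp
  | cons r t ih =>
    intro d s hcs
    rw [List.foldl_cons, ih (pvPinStep c d r) s hcs, List.filter_cons]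
    by_cases hb : (pvRowAcct r != "" && c (pvRowAcct r)) = true
    · have hps : pvPinStep c d r = d.modify (pvRowAcct r) [] (· ++ [r]) := by
        simp [pvPinStep, hb]
      rw [hps, PySem.Dict.getD_modify]
      by_cases h2 : pvRowAcct r = s
      · subst h2
        have hb' := hb
        simp only [Bool.and_eq_true, bne_iff_ne, ne_eq] at hb'
        simp [hb'.1]
      · have hne : (pvRowAcct r == s) = false := by simp [h2]
        rw [if_neg (fun he => h2 he.symm)]
        simp [hne]
    · have hps : pvPinStep c d r = d := by unfold pvPinStep; rw [if_neg hb]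
      have hf : (pvRowAcct r != "" && pvRowAcct r == s) = false := by
        by_cases h2 : pvRowAcct r = s
        · subst h2
          cases hne : (pvRowAcct r != "") with
          | false => simp at hne; simp [hne]
          | true => exact absurd (by simp [hne, hcs]) hb
        · have : (pvRowAcct r == s) = false := by simp [h2]
          simp [this]
      rw [hps]
      simp [hf]

-- keys of A's initial dict: membership = membership in ids, as B's set
theorem pvContains_d0 (accounts : List PRow) (s : String) :
    (accounts.foldl (fun d acc => d.insert (pvAccId acc) ([] : List PRow)) PySem.Dict.empty).contains s
      = PySem.Set.contains (PySem.Set.ofList (accounts.map pvAccId)) s := by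
  rw [List.foldl_map (f := pvAccId)
    (g := fun (d : PBuckets) i => d.insert i ([] : List PRow)) |>.symm]
  rw [PySem.Dict.contains_eq_decide_mem_keys]
  rw [PySem.Dict.keys_foldl_insert (f := fun _ _ => ([] : List PRow))]
  simp [PySem.Set.contains, PySem.Set.update, PySem.Set.ofList_eq_foldl, PySem.Dict.keys_empty]

-- the initial bucket dicts: every lookup is []
theorem pvInit_getD :
    ∀ (l : List String) (d : PBuckets), (∀ s, d.getD s [] = ([] : List PRow)) →
    ∀ s, (l.foldl (fun d i => d.insert i ([] : List PRow)) d).getD s [] = [] := by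
  intro l
  induction l with
  | nil => intro d hd s; exact hd s
  | cons i t ih =>
    intro d hd s
    simp only [List.foldl_cons]
    refine ih _ ?_ s
    intro s'
    rw [PySem.Dict.getD_insert]
    by_cases hs : s' = i <;> simp [hs, hd]

-- ===== VERDICT (by name: the statement is the Claim_ definition above) =====
theorem partition_rows_by_account_spec : Claim_equal_partition_rows_by_account := by
  intro rows accounts max_per_account _ _
  simp only [Spec_partition_rows_by_account, partition_rows_by_account, partition_rows_by_account_alt]
  set ids := accounts.map pvAccId with hids
  set d0 : PBuckets := accounts.foldl (fun d acc => d.insert (pvAccId acc) []) PySem.Dict.empty with hd0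
  set c : String → Bool := fun s => d0.contains s with hcdef
  have hcA : ∀ s, d0.contains s = c s := fun s => rfl
  have hcset : ∀ s, c s = PySem.Set.contains (PySem.Set.ofList ids) s := fun s =>
    pvContains_d0 accounts s
  rw [pvPass1_eq c rows d0 [] hcA]
  simp only [List.nil_append]
  have hfree : rows.filter (pvFree c)
      = rows.filter (fun r => !(pvRowAcct r != "" && PySem.Set.contains (PySem.Set.ofList ids) (pvRowAcct r))) := by
    refine List.filter_congr (fun r _ => ?_)
    simp [pvFree, hcset]
  apply PySem.List.foldl_congr_mem
  intro res acc hacc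
  have hmem : pvAccId acc ∈ ids := by
    rw [hids]; exact List.mem_map_of_mem hacc
  have hcs : c (pvAccId acc) = true := by
    rw [hcset]
    simp only [PySem.Set.contains]
    simp [PySem.Set.mem_ofList, hmem]
  have hbucket :
      (((rows.filter (pvFree c)).foldl (fun (st2 : PBuckets × Nat) row =>
          (st2.1.modify (ids.getD (st2.2 % ids.length) "") [] (· ++ [row]), st2.2 + 1))
          (rows.foldl (pvPinStep c) d0, 0)).1).getD (pvAccId acc) []
        = rows.filter (fun r => pvRowAcct r != "" && pvRowAcct r == pvAccId acc)
          ++ ((PySem.List.enumerate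
                (rows.filter (fun r => !(pvRowAcct r != "" && PySem.Set.contains (PySem.Set.ofList ids) (pvRowAcct r)))) (0 : Int)).filter
              (fun p => PySem.List.pyGetD ids (PySem.Int.mod p.1 (ids.length : Int)) "" == pvAccId acc)).map (·.2) := by
    rw [pvPass2_getD, pvPin_getD c rows d0 (pvAccId acc) hcs]
    have hd0getD : d0.getD (pvAccId acc) [] = [] := by
      rw [hd0, List.foldl_map (f := pvAccId)
        (g := fun (d : PBuckets) i => d.insert i ([] : List PRow)) |>.symm]
      exact pvInit_getD ids PySem.Dict.empty (fun s => by simp) (pvAccId acc)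
    rw [hd0getD, List.nil_append, hfree]
    have := pvAssign_eq_enum ids
      (rows.filter (fun r => !(pvRowAcct r != "" && PySem.Set.contains (PySem.Set.ofList ids) (pvRowAcct r)))) 0 (pvAccId acc)
    simpa using this
  rw [hbucket]
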